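-- pv_equiv track=rewrite | github.com/JamesDev51/algorithm | 자료구조 (Data structure)/스택 (Stack)/boj_5076.py | solve
-- ===== SOURCE A (Python) =====
-- def solve(codes):
--     stack=[]
--     tmp="";flag=False
--     for c in codes:
--         if c=="<": tmp="<"; flag=True
--         elif c==">":
--             tmp+=">"; flag=False;
--             if tmp=="<br />":continue
--             elif tmp[1]=="/" and stack and stack[-1][1:len(tmp)-2]==tmp[2:-1]:stack.pop()
--             else:stack.append(tmp)
--         else:
--             if flag:tmp+=c
--             else: tmp=""
--     return "legal" if not stack else "illegal"
-- ===== SOURCE B (Python) =====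
-- def solve(codes):
--     # Two-phase: tokenize '<...>' tags with the same reset-on-'<' buffer
--     # semantics, then run the stack matching over the token list.
--     tokens = []
--     buf = ""
--     inside = False
--     for c in codes:
--         if c == "<":
--             buf = "<"
--             inside = True
--         elif c == ">":
--             buf += ">"
--             inside = False
--             tokens.append(buf)
--         elif inside:
--             buf += c
--         else:
--             buf = ""
--     stack = []
--     for t in tokens:
--         if t == "<br />":
--             continue
--         if t.startswith("</") and stack and stack[-1][1:len(t)-2] == t[2:-1]:
--             stack.pop()
--         else:
--             stack.append(t)
--     return "legal" if not stack else "illegal"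
-- ===== Notes on version B (the rewrite author's own statement) =====
-- stated objective: alternative
-- what changed: A decides push/pop inline inside a single character scan; B decomposes it into two passes: a tokenizer that first extracts the complete '<...>' tag tokens, then a separate stack-matching loop over the token list.
-- outside the precondition, e.g. on solve('>'): A raises IndexError, B returns 'illegal'
import Mathlib
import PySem

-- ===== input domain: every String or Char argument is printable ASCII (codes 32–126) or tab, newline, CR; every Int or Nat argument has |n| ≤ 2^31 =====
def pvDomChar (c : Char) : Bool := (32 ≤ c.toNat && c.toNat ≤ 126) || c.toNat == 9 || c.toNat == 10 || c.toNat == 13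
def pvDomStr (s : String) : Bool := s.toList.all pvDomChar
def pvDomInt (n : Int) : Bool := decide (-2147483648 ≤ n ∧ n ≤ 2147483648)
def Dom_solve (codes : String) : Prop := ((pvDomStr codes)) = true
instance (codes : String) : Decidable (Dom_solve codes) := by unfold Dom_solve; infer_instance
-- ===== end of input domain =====

-- B restructures A's single interleaved scan into two phases — tokenize the '<...>' tags, then run the
-- stack matching over the token list — same values on every input where A returns (objective: alternative).

-- ===== PORT A =====
-- A's loop state: (stack, tmp, flag); the stack's top is the list head (Python appends/pops at the end).
def solveStep (st : List (List Char) × List Char × Bool) (c : Char) :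
    List (List Char) × List Char × Bool :=
  let stack := st.1; let tmp := st.2.1; let flag := st.2.2
  if c = '<' then (stack, ['<'], true)
  else if c = '>' then
    let t := tmp ++ ['>']
    if t = "<br />".toList then (stack, t, false)
    else
      match PySem.List.pyGet? t 1 with
      | some ch =>
        if ch = '/' then
          match stack with
          | top :: rest =>
            if PySem.List.slice top (some 1) (some ((t.length : Int) - 2)) =
               PySem.List.slice t (some 2) (some (-1))
            then (rest, t, false) else (t :: stack, t, false)
          | [] => (t :: stack, t, false)
        else (t :: stack, t, false)
      | none => (t :: stack, t, false)  -- Python raises IndexError here (tmp[1] on len < 2); excluded by Pre_solve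
  else if flag then (stack, tmp ++ [c], true)
  else (stack, ([] : List Char), false)

def solve (codes : String) : String :=
  if (codes.toList.foldl solveStep ([], [], false)).1 = [] then "legal" else "illegal"

-- ===== PORT B =====
-- B phase 1: tokenizer step over (tokens, buf, inside).
def tokStep (st : List (List Char) × List Char × Bool) (c : Char) :
    List (List Char) × List Char × Bool :=
  let toks := st.1; let buf := st.2.1; let inside := st.2.2
  if c = '<' then (toks, ['<'], true)
  else if c = '>' then (toks ++ [buf ++ ['>']], buf ++ ['>'], false)
  else if inside then (toks, buf ++ [c], true)
  else (toks, ([] : List Char), false)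

-- B phase 2: stack step over one token.
def matchStep (stack : List (List Char)) (t : List Char) : List (List Char) :=
  if t = "<br />".toList then stack
  else if PySem.Chars.startswith t ['<', '/'] then
    match stack with
    | top :: rest =>
      if PySem.List.slice top (some 1) (some ((t.length : Int) - 2)) =
         PySem.List.slice t (some 2) (some (-1))
      then rest else t :: stack
    | [] => t :: stack
  else t :: stack

def solve_alt (codes : String) : String :=
  if ((codes.toList.foldl tokStep ([], [], false)).1).foldl matchStep [] = [] then "legal" else "illegal"

-- ===== PRECONDITION & SPEC =====
-- Pre_solve excludes exactly the inputs on which A raises IndexError: a '>' reached while A's buffer is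
-- empty, i.e. a '>' that neither directly follows a '>' nor has a pending unclosed '<' before it.
def Pre_solve (codes : String) : Prop :=
  ∀ i, i < codes.toList.length → codes.toList.getD i ' ' = '>' →
    (0 < i ∧ codes.toList.getD (i - 1) ' ' = '>') ∨
    (∃ j, j < i ∧ codes.toList.getD j ' ' = '<' ∧
      ∀ k, k < i → j < k → codes.toList.getD k ' ' ≠ '>')

instance (codes : String) : Decidable (Pre_solve codes) := by unfold Pre_solve; infer_instance

def pvWitness_solve : String := "<p><br /></p>"

def Spec_solve (codes : String) (out : String) : Prop := out = solve_alt codes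
instance (codes : String) (out : String) : Decidable (Spec_solve codes out) := by unfold Spec_solve; infer_instance

-- ===== CLAIM (what is proved, stated in full; the proofs are below) =====
def Claim_equal_solve : Prop := ∀ (codes : String), Dom_solve codes → Pre_solve codes → Spec_solve codes (solve codes)

-- ===== LEMMAS AND PROOFS =====

-- Generalized precondition on a suffix, relative to machine state (e = "buffer empty", f = flag).
def GPre (e f : Bool) (l : List Char) : Prop :=
  ∀ i, i < l.length → l.getD i ' ' = '>' →
    (i = 0 ∧ e = false) ∨
    (0 < i ∧ l.getD (i - 1) ' ' = '>') ∨
    (∃ j, j < i ∧ l.getD j ' ' = '<' ∧ ∀ k, k < i → j < k → l.getD k ' ' ≠ '>') ∨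
    (f = true ∧ e = false ∧ ∀ k, k < i → l.getD k ' ' ≠ '>')

lemma gpre_lt {e f : Bool} {r : List Char} (h : GPre e f ('<' :: r)) : GPre false true r := by
  intro i hi hg
  cases i with
  | zero => exact Or.inl ⟨rfl, rfl⟩
  | succ n =>
    have hD := h (n + 2) (by simp; omega) (by simpa using hg)
    rcases hD with ⟨h1, _⟩ | ⟨_, h2⟩ | ⟨j, hj, hjc, hjk⟩ | ⟨_, _, h4⟩
    · omega
    · exact Or.inr (Or.inl ⟨Nat.succ_pos n, by simpa using h2⟩)
    · cases j with
      | zero =>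
        refine Or.inr (Or.inr (Or.inr ⟨rfl, rfl, fun k hk => ?_⟩))
        simpa using hjk (k + 1) (by omega) (by omega)
      | succ m =>
        refine Or.inr (Or.inr (Or.inl ⟨m, by omega, by simpa using hjc, fun k hk hmk => ?_⟩))
        simpa using hjk (k + 1) (by omega) (by omega)
    · refine Or.inr (Or.inr (Or.inr ⟨rfl, rfl, fun k hk => ?_⟩))
      simpa using h4 (k + 1) (by omega)

lemma gpre_gt_ne {e f : Bool} {r : List Char} (h : GPre e f ('>' :: r)) : e = false := by
  have hD := h 0 (by simp) (by simp)
  rcases hD with ⟨_, he⟩ | ⟨h0, _⟩ | ⟨j, hj, _⟩ | ⟨_, he, _⟩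
  · exact he
  · omega
  · omega
  · exact he

lemma gpre_gt {e f : Bool} {r : List Char} (h : GPre e f ('>' :: r)) : GPre false false r := by
  intro i hi hg
  cases i with
  | zero => exact Or.inl ⟨rfl, rfl⟩
  | succ n =>
    have hD := h (n + 2) (by simp; omega) (by simpa using hg)
    rcases hD with ⟨h1, _⟩ | ⟨_, h2⟩ | ⟨j, hj, hjc, hjk⟩ | ⟨_, _, h4⟩
    · omega
    · exact Or.inr (Or.inl ⟨Nat.succ_pos n, by simpa using h2⟩)
    · cases j with
      | zero => simp at hjc
      | succ m =>
        refine Or.inr (Or.inr (Or.inl ⟨m, by omega, by simpa using hjc, fun k hk hmk => ?_⟩))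
        simpa using hjk (k + 1) (by omega) (by omega)
    · exact absurd (by simp : ('>' :: r).getD 0 ' ' = '>') (h4 0 (by omega))

lemma gpre_ord_t {e : Bool} {c : Char} {r : List Char} (hc1 : c ≠ '<') (hc2 : c ≠ '>')
    (h : GPre e true (c :: r)) : GPre e true r := by
  intro i hi hg
  cases i with
  | zero =>
    have hD := h 1 (by simp; omega) (by simpa using hg)
    rcases hD with ⟨h1, _⟩ | ⟨_, h2⟩ | ⟨j, hj, hjc, _⟩ | ⟨_, he, _⟩
    · omega
    · exact absurd (by simpa using h2) hc2
    · interval_cases j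
      exact absurd (by simpa using hjc) hc1
    · exact Or.inl ⟨rfl, he⟩
  | succ n =>
    have hD := h (n + 2) (by simp; omega) (by simpa using hg)
    rcases hD with ⟨h1, _⟩ | ⟨_, h2⟩ | ⟨j, hj, hjc, hjk⟩ | ⟨_, he, h4⟩
    · omega
    · exact Or.inr (Or.inl ⟨Nat.succ_pos n, by simpa using h2⟩)
    · cases j with
      | zero => exact absurd (by simpa using hjc) hc1
      | succ m =>
        refine Or.inr (Or.inr (Or.inl ⟨m, by omega, by simpa using hjc, fun k hk hmk => ?_⟩))
        simpa using hjk (k + 1) (by omega) (by omega)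
    · refine Or.inr (Or.inr (Or.inr ⟨rfl, he, fun k hk => ?_⟩))
      simpa using h4 (k + 1) (by omega)

lemma gpre_ord_f {e : Bool} {c : Char} {r : List Char} (hc1 : c ≠ '<') (hc2 : c ≠ '>')
    (h : GPre e false (c :: r)) : GPre true false r := by
  intro i hi hg
  cases i with
  | zero =>
    have hD := h 1 (by simp; omega) (by simpa using hg)
    rcases hD with ⟨h1, _⟩ | ⟨_, h2⟩ | ⟨j, hj, hjc, _⟩ | ⟨hf, _, _⟩
    · omega
    · exact absurd (by simpa using h2) hc2
    · interval_cases j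
      exact absurd (by simpa using hjc) hc1
    · simp at hf
  | succ n =>
    have hD := h (n + 2) (by simp; omega) (by simpa using hg)
    rcases hD with ⟨h1, _⟩ | ⟨_, h2⟩ | ⟨j, hj, hjc, hjk⟩ | ⟨hf, _, _⟩
    · omega
    · exact Or.inr (Or.inl ⟨Nat.succ_pos n, by simpa using h2⟩)
    · cases j with
      | zero => exact absurd (by simpa using hjc) hc1
      | succ m =>
        refine Or.inr (Or.inr (Or.inl ⟨m, by omega, by simpa using hjc, fun k hk hmk => ?_⟩))
        simpa using hjk (k + 1) (by omega) (by omega)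
    · simp at hf

-- Token accumulator of tokStep distributes.
lemma tok_acc (l : List Char) (toks : List (List Char)) (buf : List Char) (ins : Bool) :
    l.foldl tokStep (toks, buf, ins) =
      (toks ++ (l.foldl tokStep ([], buf, ins)).1, (l.foldl tokStep ([], buf, ins)).2) := by
  induction l generalizing toks buf ins with
  | nil => simp
  | cons c l ih =>
    simp only [List.foldl_cons]
    have hstep : tokStep (toks, buf, ins) c =
        (toks ++ (tokStep ([], buf, ins) c).1, (tokStep ([], buf, ins) c).2) := by
      simp only [tokStep]; split_ifs <;> simp
    rw [hstep, ih]
    rcases h0 : tokStep ([], buf, ins) c with ⟨t0, b0, i0⟩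
    rw [ih t0 b0 i0]
    simp

-- On a '>' with a nonempty '<'-headed buffer, A's step is exactly B's matchStep on the emitted token.
lemma step_gt_match (stack : List (List Char)) (rest : List Char) (fl : Bool) :
    solveStep (stack, '<' :: rest, fl) '>' =
      (matchStep stack (('<' :: rest) ++ ['>']), ('<' :: rest) ++ ['>'], false) := by
  cases rest with
  | nil =>
    simp [solveStep, matchStep, PySem.List.pyGet?, PySem.List.pyIdx?, PySem.Chars.startswith,
      List.isPrefixOf]
  | cons x r =>
    have h0 : (0:Int) ≤ (r.length:Int) + 1 := by positivity
    by_cases hx : x = '/' <;>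
      simp [solveStep, matchStep, PySem.List.pyGet?, PySem.List.pyIdx?, PySem.Chars.startswith,
        List.isPrefixOf, hx, h0] <;>
      cases stack <;>
        first
        | (simp only []; split_ifs <;> first | rfl | (subst_eqs; simp_all))
        | simp only []

-- Main simulation: under GPre and the buffer invariant, A's fold = B's tokenize-then-match.
lemma sim (l : List Char) :
    ∀ (stack : List (List Char)) (tmp : List Char) (flag : Bool),
      ((tmp = [] ∧ flag = false) ∨ tmp.head? = some '<') →
      GPre tmp.isEmpty flag l →
      (l.foldl solveStep (stack, tmp, flag)).1 =
        ((l.foldl tokStep ([], tmp, flag)).1).foldl matchStep stack := by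
  induction l with
  | nil => intro stack tmp flag _ _; simp
  | cons c l ih =>
    intro stack tmp flag hinv hg
    by_cases hc1 : c = '<'
    · subst hc1
      simp only [List.foldl_cons]
      have e1 : solveStep (stack, tmp, flag) '<' = (stack, ['<'], true) := by simp [solveStep]
      have e2 : tokStep ([], tmp, flag) '<' = ([], ['<'], true) := by simp [tokStep]
      rw [e1, e2]
      exact ih stack ['<'] true (Or.inr rfl) (by simpa using gpre_lt hg)
    by_cases hc2 : c = '>'
    · subst hc2
      have he := gpre_gt_ne hg
      have hhd : tmp.head? = some '<' := by
        rcases hinv with ⟨h1, _⟩ | h2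
        · subst h1; simp at he
        · exact h2
      obtain ⟨rest, hrest⟩ : ∃ rest, tmp = '<' :: rest := by
        cases tmp with
        | nil => simp at hhd
        | cons a t =>
          simp only [List.head?_cons, Option.some.injEq] at hhd
          exact ⟨t, by rw [hhd]⟩
      subst hrest
      simp only [List.foldl_cons]
      rw [step_gt_match]
      have e2 : tokStep ([], '<' :: rest, flag) '>' =
          ([('<' :: rest) ++ ['>']], ('<' :: rest) ++ ['>'], false) := by simp [tokStep]
      rw [e2, tok_acc]
      simp only [List.foldl_cons, List.cons_append, List.nil_append]
      exact ih (matchStep stack (('<' :: rest) ++ ['>'])) (('<' :: rest) ++ ['>']) false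
        (Or.inr rfl) (by simpa using gpre_gt hg)
    by_cases hf : flag = true
    · subst hf
      have hhd : tmp.head? = some '<' := by
        rcases hinv with ⟨_, h1⟩ | h2
        · simp at h1
        · exact h2
      have htne : tmp ≠ [] := by intro h; rw [h] at hhd; simp at hhd
      simp only [List.foldl_cons]
      have e1 : solveStep (stack, tmp, true) c = (stack, tmp ++ [c], true) := by
        simp [solveStep, hc1, hc2]
      have e2 : tokStep ([], tmp, true) c = ([], tmp ++ [c], true) := by
        simp [tokStep, hc1, hc2]
      rw [e1, e2]
      refine ih stack (tmp ++ [c]) true (Or.inr ?_) ?_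
      · cases tmp with
        | nil => simp at hhd
        | cons a t => simpa using hhd
      · have h1 : tmp.isEmpty = false := by simpa using htne
        have hg' := gpre_ord_t hc1 hc2 hg
        rw [h1] at hg'
        have h2 : (tmp ++ [c]).isEmpty = false := by simp
        rw [h2]
        exact hg'
    · have hf' : flag = false := by simpa using hf
      subst hf'
      simp only [List.foldl_cons]
      have e1 : solveStep (stack, tmp, false) c = (stack, [], false) := by
        simp [solveStep, hc1, hc2]
      have e2 : tokStep ([], tmp, false) c = ([], [], false) := by
        simp [tokStep, hc1, hc2]
      rw [e1, e2]
      exact ih stack [] false (Or.inl ⟨rfl, rfl⟩) (by simpa using gpre_ord_f hc1 hc2 hg)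

lemma pre_gpre {codes : String} (h : Pre_solve codes) : GPre true false codes.toList := by
  intro i hi hgt
  rcases h i hi hgt with h2 | h3
  · exact Or.inr (Or.inl h2)
  · exact Or.inr (Or.inr (Or.inl h3))

-- ===== VERDICT (by name: the statement is the Claim_ definition above) =====
theorem solve_spec : Claim_equal_solve := by
  intro codes _ hpre
  unfold Spec_solve solve solve_alt
  have := sim codes.toList [] [] false (Or.inl ⟨rfl, rfl⟩) (pre_gpre hpre)
  rw [this]
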